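-- pv_equiv track=rewrite | github.com/joergsimon/SSL-ECG-Paper-Reimplementaton | src/datasets/wesad.py | iterate_clean_labeled_sections
-- ===== SOURCE A (Python) =====
-- def iterate_clean_labeled_sections(ecg, lbls):
--     l_value = lbls[0]
--     l_index = 0
--     for i in range(1, len(lbls)):
--         i_val = lbls[i]
--         if i_val != l_value:
--             yield l_value, ecg[l_index:i]
--             l_value = i_val
--             l_index = i
--     yield l_value, ecg[l_index:]
-- ===== SOURCE B (Python) =====
-- def iterate_clean_labeled_sections(ecg, lbls):
--     # Stage 1: boundary table of run-start indices.
--     starts = [0] + [i for i in range(1, len(lbls)) if lbls[i] != lbls[i - 1]]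
--     # Stage 2: emit pass over consecutive start pairs, then the open-ended tail.
--     for s, e in zip(starts, starts[1:]):
--         yield lbls[s], ecg[s:e]
--     yield lbls[starts[-1]], ecg[starts[-1]:]
-- ===== Notes on version B (the rewrite author's own statement) =====
-- stated objective: alternative
-- what changed: B replaces A's single interleaved scan with mutable run state by two separate stages: first a boundary table of run-start indices, then an emit pass zipping consecutive starts (open-ended ecg slice for the last run).
import Mathlib
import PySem

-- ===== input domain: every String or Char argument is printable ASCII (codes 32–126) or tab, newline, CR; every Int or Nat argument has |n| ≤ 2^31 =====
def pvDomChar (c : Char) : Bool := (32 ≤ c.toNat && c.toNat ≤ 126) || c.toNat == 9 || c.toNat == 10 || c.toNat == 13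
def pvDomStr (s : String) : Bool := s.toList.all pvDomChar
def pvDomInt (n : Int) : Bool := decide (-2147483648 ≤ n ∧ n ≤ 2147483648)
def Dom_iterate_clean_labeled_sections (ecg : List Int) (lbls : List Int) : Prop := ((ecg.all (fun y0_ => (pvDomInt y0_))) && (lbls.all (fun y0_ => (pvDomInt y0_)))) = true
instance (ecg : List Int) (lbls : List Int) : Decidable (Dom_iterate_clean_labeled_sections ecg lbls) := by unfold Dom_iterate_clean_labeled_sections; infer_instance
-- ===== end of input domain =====

-- B differs from A in decomposition only (boundary table + emit pass vs interleaved scan);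
-- return values agree on all nonempty lbls. Generators are ported as the list of yielded pairs.

-- ===== PORT A =====
-- lbls[i] for an in-range index i (Pre_ keeps the Python in range); default 0 only pads totality
def pvGetL (lbls : List Int) (i : Int) : Int := (PySem.List.pyGet? lbls i).getD 0

-- loop body of A: state (l_value, l_index, yielded so far)
def pvStepA (ecg : List Int) (lbls : List Int) (st : Int × Int × List (Int × List Int)) (i : Int) :
    Int × Int × List (Int × List Int) :=
  let i_val := pvGetL lbls i
  if i_val ≠ st.1 then (i_val, i, st.2.2 ++ [(st.1, PySem.List.slice ecg (some st.2.1) (some i))])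
  else st

def iterate_clean_labeled_sections (ecg : List Int) (lbls : List Int) : List (Int × List Int) :=
  let st := (PySem.List.pyRange 1 (lbls.length : Int) 1).foldl (pvStepA ecg lbls) (pvGetL lbls 0, 0, [])
  st.2.2 ++ [(st.1, PySem.List.slice ecg (some st.2.1) none)]

-- ===== PORT B =====
def iterate_clean_labeled_sections_alt (ecg : List Int) (lbls : List Int) : List (Int × List Int) :=
  let starts : List Int :=
    0 :: (PySem.List.pyRange 1 (lbls.length : Int) 1).filter
      (fun i => pvGetL lbls i ≠ pvGetL lbls (i - 1))
  let last := starts.getLastD 0   -- starts[-1]; starts is never empty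
  (starts.zip starts.tail).map
    (fun se => (pvGetL lbls se.1, PySem.List.slice ecg (some se.1) (some se.2)))
  ++ [(pvGetL lbls last, PySem.List.slice ecg (some last) none)]

-- ===== PRECONDITION & SPEC =====
-- Pre_ excludes only lbls = [], where the Python A raises IndexError on lbls[0] (B raises there too).
def Pre_iterate_clean_labeled_sections (ecg : List Int) (lbls : List Int) : Prop := lbls ≠ []
instance (ecg : List Int) (lbls : List Int) : Decidable (Pre_iterate_clean_labeled_sections ecg lbls) := by unfold Pre_iterate_clean_labeled_sections; infer_instance

def pvWitness_iterate_clean_labeled_sections : List Int × List Int := ([5, 6, 7], [1, 1, 2])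

def Spec_iterate_clean_labeled_sections (ecg : List Int) (lbls : List Int) (out : List (Int × List Int)) : Prop := out = iterate_clean_labeled_sections_alt ecg lbls
instance (ecg : List Int) (lbls : List Int) (out : List (Int × List Int)) : Decidable (Spec_iterate_clean_labeled_sections ecg lbls out) := by unfold Spec_iterate_clean_labeled_sections; infer_instance

-- ===== CLAIM (what is proved, stated in full; the proofs are below) =====
def Claim_equal_iterate_clean_labeled_sections : Prop := ∀ (ecg : List Int) (lbls : List Int), Dom_iterate_clean_labeled_sections ecg lbls → Pre_iterate_clean_labeled_sections ecg lbls → Spec_iterate_clean_labeled_sections ecg lbls (iterate_clean_labeled_sections ecg lbls)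

-- ===== LEMMAS AND PROOFS =====

-- reference shape: segments determined by a list of boundary indices, starting at li
def pvSegs (ecg : List Int) (lbls : List Int) : Int → List Int → List (Int × List Int)
  | li, [] => [(pvGetL lbls li, PySem.List.slice ecg (some li) none)]
  | li, b :: bs => (pvGetL lbls li, PySem.List.slice ecg (some li) (some b)) :: pvSegs ecg lbls b bs

-- B's emit pass produces pvSegs
theorem pvB_emit (ecg lbls : List Int) (bs : List Int) (s : Int) :
    ((s :: bs).zip bs).map
      (fun se => (pvGetL lbls se.1, PySem.List.slice ecg (some se.1) (some se.2)))
    ++ [(pvGetL lbls ((s :: bs).getLastD 0), PySem.List.slice ecg (some ((s :: bs).getLastD 0)) none)]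
    = pvSegs ecg lbls s bs := by
  induction bs generalizing s with
  | nil => simp [pvSegs]
  | cons b bs ih =>
    simp only [List.zip_cons_cons, List.map_cons, List.cons_append, pvSegs]
    rw [show (s :: b :: bs).getLastD 0 = (b :: bs).getLastD 0 from rfl, ih b]

-- A's fold over the remaining index range produces pvSegs of the boundary-filtered range
theorem pvA_fold (ecg lbls : List Int) (m : ℕ) :
    ∀ (k li : Int) (acc : List (Int × List Int)),
    m = ((lbls.length : Int) - k).toNat → li < k →
    (∀ j, li ≤ j → j < k → pvGetL lbls j = pvGetL lbls li) →
    (let st := (PySem.List.pyRange k (lbls.length : Int) 1).foldl (pvStepA ecg lbls) (pvGetL lbls li, li, acc)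
     st.2.2 ++ [(st.1, PySem.List.slice ecg (some st.2.1) none)])
    = acc ++ pvSegs ecg lbls li
        ((PySem.List.pyRange k (lbls.length : Int) 1).filter
          (fun i => pvGetL lbls i ≠ pvGetL lbls (i - 1))) := by
  induction m with
  | zero =>
    intro k li acc hm _ _
    rw [PySem.List.pyRange_one_eq_nil (by omega)]
    simp [pvSegs]
  | succ m ih =>
    intro k li acc hm hlik hconst
    by_cases hk : k < (lbls.length : Int)
    · rw [PySem.List.pyRange_one_cons hk]
      simp only [List.foldl_cons, List.filter_cons]
      have hprev : pvGetL lbls (k - 1) = pvGetL lbls li := hconst (k - 1) (by omega) (by omega)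
      by_cases hb : pvGetL lbls k ≠ pvGetL lbls (k - 1)
      · have hstep : pvStepA ecg lbls (pvGetL lbls li, li, acc) k
            = (pvGetL lbls k, k, acc ++ [(pvGetL lbls li, PySem.List.slice ecg (some li) (some k))]) := by
          simp [pvStepA, hprev ▸ hb]
        rw [hstep, ih (k + 1) k _ (by omega) (by omega) (by intro j h1 h2; congr 1; omega)]
        simp [hb, pvSegs]
      · have hb' : pvGetL lbls k = pvGetL lbls li := by rw [← hprev]; exact not_ne_iff.mp hb
        have hstep : pvStepA ecg lbls (pvGetL lbls li, li, acc) k = (pvGetL lbls li, li, acc) := by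
          simp [pvStepA, hb']
        rw [hstep, ih (k + 1) li acc (by omega) (by omega)
            (by intro j h1 h2
                by_cases hj : j = k
                · exact hj ▸ hb'
                · exact hconst j h1 (by omega))]
        simp [hb]
    · rw [PySem.List.pyRange_one_eq_nil (by omega)]
      simp [pvSegs]

-- ===== VERDICT (by name: the statement is the Claim_ definition above) =====
theorem iterate_clean_labeled_sections_spec : Claim_equal_iterate_clean_labeled_sections := by
  intro ecg lbls _ hpre
  have hn : 0 < (lbls.length : Int) := by
    have : lbls.length ≠ 0 := fun h => hpre (List.eq_nil_of_length_eq_zero h)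
    omega
  unfold Spec_iterate_clean_labeled_sections iterate_clean_labeled_sections
    iterate_clean_labeled_sections_alt
  rw [pvA_fold ecg lbls ((lbls.length : Int) - 1).toNat 1 0 [] (by omega) (by omega)
      (by intro j h1 h2; congr 1; omega)]
  rw [← pvB_emit ecg lbls]
  rfl
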